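-- pv_equiv track=rewrite | github.com/JRC1995/BeamTreeRecursiveCells | collaters/classifier_collater.py | parse_trees
-- ===== SOURCE A (Python) =====
-- def parse_trees(batch_x):
--
--     batch_parse_decisions = []
--     max_len = max([len(x) for x in batch_x])
--
--     for x in batch_x:
--         parse_decisions = []
--         x_ = x
--         for i in range(len(x)):
--             if len(x_) > 2:
--                 left_x = x_[0:-1]
--                 right_x = x_[1:]
--                 parse_decisions_i = [0] * max_len
--                 x_ = []
--                 flag = 0
--                 for j in range(len(left_x)):
--                     if flag == 0:
--                         if "[" in left_x[j] and "[" not in right_x[j]: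
--                             parse_decisions_i[j] = 1
--                             if right_x[j] == "]":
--                                 l = "b"
--                             else:
--                                 l = "["
--                             x_.append(l)
--                             flag = 1
--                         else:
--                             x_.append(left_x[j])
--                     else:
--                         x_.append(right_x[j])
--                 parse_decisions.append(parse_decisions_i)
--
--         while len(parse_decisions) < max_len:
--             parse_decisions.append([0] * max_len)
--         batch_parse_decisions.append(parse_decisions)
--
--     return batch_parse_decisions
-- ===== SOURCE B (Python) =====
-- def parse_trees(batch_x):
--     # One-pass shift-reduce with an explicit stack instead of repeated leftmost rescans.
--     max_len = max(len(x) for x in batch_x)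
--     out = []
--     for x in batch_x:
--         rows = []
--         limit = len(x) - 2          # A merges only while the working sequence is longer than 2
--         stack = []
--         for tok in x:
--             t = tok
--             while len(rows) < limit and stack and "[" in stack[-1] and "[" not in t:
--                 row = [0] * max_len
--                 row[len(stack) - 1] = 1
--                 rows.append(row)
--                 t = "b" if t == "]" else "["
--                 stack.pop()
--             stack.append(t)
--         rows += [[0] * max_len for _ in range(max_len - len(rows))]
--         out.append(rows)
--     return out
-- ===== Notes on version B (the rewrite author's own statement) =====
-- stated objective: alternative
-- what changed: Replaces A's repeated full rescans of the shrinking sequence (one O(n) rebuild pass per decision row) by a single left-to-right shift-reduce pass over the original tokens with an explicit stack: each token is pushed after greedily reducing it against the stack top, which yields exactly the leftmost-merge rows in one pass, and all no-merge rounds collapse into the closed-form zero padding.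
import Mathlib
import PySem

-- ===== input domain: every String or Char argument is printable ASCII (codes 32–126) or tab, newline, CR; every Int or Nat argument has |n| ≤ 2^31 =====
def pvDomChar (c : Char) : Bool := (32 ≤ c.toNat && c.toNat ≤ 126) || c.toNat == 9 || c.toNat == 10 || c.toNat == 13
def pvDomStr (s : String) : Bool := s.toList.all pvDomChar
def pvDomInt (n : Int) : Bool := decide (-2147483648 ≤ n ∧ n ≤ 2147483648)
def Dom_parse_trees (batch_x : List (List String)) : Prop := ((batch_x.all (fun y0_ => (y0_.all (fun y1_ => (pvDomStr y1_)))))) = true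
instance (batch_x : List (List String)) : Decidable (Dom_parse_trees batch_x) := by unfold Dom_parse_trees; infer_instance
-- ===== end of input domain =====

-- B replaces A's repeated leftmost-merge rescans by a single shift-reduce pass with an
-- explicit stack, the no-merge rounds collapsing into the zero padding (objective: alternative).


-- ===== PORT A =====
-- inner 'for j in range(len(left_x))' loop body; state = (parse_decisions_i, x_, flag, j)
def ptScanStep : (List Int × (List String × (Int × Nat))) → String × String →
    List Int × (List String × (Int × Nat))
  | (row, (acc, (flag, j))), (a, b) =>
    if flag = 0 then
      if PySem.Str.isIn "[" a && !(PySem.Str.isIn "[" b) then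
        (row.set j 1, (acc ++ [if b = "]" then "b" else "["], (1, j + 1)))
      else (row, (acc ++ [a], (flag, j + 1)))
    else (row, (acc ++ [b], (flag, j + 1)))

-- one iteration of A's 'for i in range(len(x))' loop; state = (parse_decisions, x_)
def ptRound (max_len : Nat) (st : List (List Int) × List String) :
    List (List Int) × List String :=
  let pds := st.1; let x_ := st.2
  if 2 < x_.length then
    let left_x := PySem.List.slice x_ none (some (-1))
    let right_x := PySem.List.slice x_ (some 1) none
    let r := (left_x.zip right_x).foldl ptScanStep (List.replicate max_len (0 : Int), ([], (0, 0)))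
    (pds ++ [r.1], r.2.1)
  else (pds, x_)

-- 'while len(parse_decisions) < max_len: parse_decisions.append([0]*max_len)'
def ptPad (max_len : Nat) (pds : List (List Int)) : List (List Int) :=
  if pds.length < max_len then ptPad max_len (pds ++ [List.replicate max_len (0 : Int)]) else pds
termination_by max_len - pds.length
decreasing_by simp; omega

def parse_trees (batch_x : List (List String)) : List (List (List Int)) :=
  let max_len : Nat := (PySem.List.max? (batch_x.map (fun x => x.length)) (fun v => v)).getD 0
  batch_x.foldl (fun bpd x =>
    let st := (List.range x.length).foldl (fun st _ => ptRound max_len st) ([], x)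
    bpd ++ [ptPad max_len st.1]) []

-- ===== PORT B =====
-- Source B's inner 'while' loop: greedily reduce token t against the stack top
-- (stack as a Lean list with head = top; row index len(stack)-1 = rest.length)
def reduceLoop (limit max_len : Nat) (rows : List (List Int)) (stack : List String) (t : String) :
    List (List Int) × List String × String :=
  match stack with
  | [] => (rows, [], t)
  | s :: rest =>
    if rows.length < limit ∧ (PySem.Str.isIn "[" s && !(PySem.Str.isIn "[" t)) = true then
      reduceLoop limit max_len (rows ++ [(List.replicate max_len (0 : Int)).set rest.length 1])
        rest (if t = "]" then "b" else "[")
    else (rows, s :: rest, t)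

def parse_trees_alt (batch_x : List (List String)) : List (List (List Int)) :=
  let max_len : Nat := (PySem.List.max? (batch_x.map (fun x => x.length)) (fun v => v)).getD 0
  batch_x.map (fun x =>
    let limit := x.length - 2
    let st := x.foldl (fun (st : List (List Int) × List String) tok =>
        let r := reduceLoop limit max_len st.1 st.2 tok
        (r.1, r.2.2 :: r.2.1)) ([], [])
    st.1 ++ (List.range (max_len - st.1.length)).map (fun _ => List.replicate max_len (0 : Int)))

-- ===== PRECONDITION & SPEC =====
-- Pre_ excludes only the empty batch, on which Python A raises ValueError (max of an empty list).
def Pre_parse_trees (batch_x : List (List String)) : Prop := batch_x ≠ []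
instance (batch_x : List (List String)) : Decidable (Pre_parse_trees batch_x) := by
  unfold Pre_parse_trees; infer_instance

def pvWitness_parse_trees : List (List String) := [["[", "[", "a", "]", "]"]]

def Spec_parse_trees (batch_x : List (List String)) (out : List (List (List Int))) : Prop := out = parse_trees_alt batch_x
instance (batch_x : List (List String)) (out : List (List (List Int))) : Decidable (Spec_parse_trees batch_x out) := by unfold Spec_parse_trees; infer_instance

-- ===== CLAIM (what is proved, stated in full; the proofs are below) =====
def Claim_equal_parse_trees : Prop := ∀ (batch_x : List (List String)), Dom_parse_trees batch_x → Pre_parse_trees batch_x → Spec_parse_trees batch_x (parse_trees batch_x)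

-- ===== LEMMAS AND PROOFS =====

-- ---- leftmost-merge characterisation used by both sides ----

-- leftmost k with '[' in xs[k] and '[' not in xs[k+1]
def findJ : List String → Option Nat
  | a :: b :: rest =>
      if PySem.Str.isIn "[" a && !(PySem.Str.isIn "[" b) then some 0
      else (findJ (b :: rest)).map (· + 1)
  | _ => none

theorem findJ_lt {xs : List String} {j : Nat} (h : findJ xs = some j) : j + 1 < xs.length := by
  induction xs generalizing j with
  | nil => simp [findJ] at h
  | cons a t ih =>
    cases t with
    | nil => simp [findJ] at h
    | cons b r =>
      rw [findJ] at h
      split at h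
      · cases h; simp
      · simp only [Option.map_eq_some_iff] at h
        obtain ⟨j', hj', rfl⟩ := h
        have := ih hj'
        simp at this ⊢; omega

-- A's per-sequence loop, rewritten with findJ (intermediate form, proof-only)
def altLoop (max_len : Nat) (x_ : List String) : List (List Int) :=
  if _h2 : 2 < x_.length then
    match hf : findJ x_ with
    | none => List.replicate max_len (0 : Int) :: altLoop max_len x_.dropLast
    | some j =>
        (List.replicate max_len (0 : Int)).set j 1 ::
          altLoop max_len
            (x_.take j ++ [if x_.getD (j + 1) "" = "]" then "b" else "["] ++ x_.drop (j + 2))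
  else []
termination_by x_.length
decreasing_by
  · simp; omega
  · have := findJ_lt hf; simp; omega

-- the merge rows only, with a merge budget b (A stops merging when the sequence reaches length 2)
def lmRowsB (max_len : Nat) : Nat → List String → List (List Int)
  | 0, _ => []
  | b + 1, xs =>
    match findJ xs with
    | none => []
    | some j =>
        (List.replicate max_len (0 : Int)).set j 1 ::
          lmRowsB max_len b
            (xs.take j ++ [if xs.getD (j + 1) "" = "]" then "b" else "["] ++ xs.drop (j + 2))

def NoMerge (a b : String) : Prop := (PySem.Str.isIn "[" a && !(PySem.Str.isIn "[" b)) = false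

-- ---- A-side: the fused scan round equals the findJ characterisation (as before) ----

theorem zip_dropLast_tail : ∀ (xs : List String), xs.dropLast.zip xs.tail = xs.zip xs.tail := by
  intro xs
  induction xs with
  | nil => rfl
  | cons a t ih =>
    cases t with
    | nil => rfl
    | cons b r =>
      simp only [List.dropLast_cons₂, List.zip_cons_cons, List.tail_cons]
      have := ih
      simp only [List.tail_cons] at this
      rw [this]

theorem scan_flag1 : ∀ (l : List String) (row : List Int) (p : List String) (k : Nat),
    ((l.zip l.tail).foldl ptScanStep (row, (p, (1, k)))).1 = row ∧
    ((l.zip l.tail).foldl ptScanStep (row, (p, (1, k)))).2.1 = p ++ l.tail := by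
  intro l
  induction l with
  | nil => simp
  | cons a t ih =>
    cases t with
    | nil => simp
    | cons b r =>
      intro row p k
      simp only [List.tail_cons, List.zip_cons_cons, List.foldl_cons]
      have hstep : ptScanStep (row, (p, (1, k))) (a, b) = (row, (p ++ [b], (1, k + 1))) := by
        simp only [ptScanStep]
        rw [if_neg (by decide)]
      rw [hstep]
      have := ih row (p ++ [b]) (k + 1)
      simp only [List.tail_cons] at this
      simpa using this

theorem scan_spec : ∀ (l : List String) (row : List Int) (p : List String) (k : Nat),
    (((l.zip l.tail).foldl ptScanStep (row, (p, (0, k)))).1,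
     ((l.zip l.tail).foldl ptScanStep (row, (p, (0, k)))).2.1) =
    (match findJ l with
    | some j => (row.set (k + j) 1,
        p ++ l.take j ++ [if l.getD (j + 1) "" = "]" then "b" else "["] ++ l.drop (j + 2))
    | none => (row, p ++ l.dropLast)) := by
  intro l
  induction l with
  | nil => simp [findJ]
  | cons a t ih =>
    cases t with
    | nil => simp [findJ]
    | cons b r =>
      intro row p k
      simp only [List.tail_cons, List.zip_cons_cons, List.foldl_cons]
      rw [findJ]
      by_cases hc : (PySem.Str.isIn "[" a && !(PySem.Str.isIn "[" b)) = true
      · have hstep : ptScanStep (row, (p, (0, k))) (a, b) =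
            (row.set k 1, (p ++ [if b = "]" then "b" else "["], (1, k + 1))) := by
          simp only [ptScanStep]
          rw [if_pos trivial, if_pos hc]
        rw [hstep, if_pos hc]
        have hf1 := scan_flag1 (b :: r) (row.set k 1) (p ++ [if b = "]" then "b" else "["]) (k + 1)
        simp only [List.tail_cons] at hf1
        simp [hf1.1, hf1.2, List.getD]
      · have hstep : ptScanStep (row, (p, (0, k))) (a, b) = (row, (p ++ [a], (0, k + 1))) := by
          simp only [ptScanStep]
          rw [if_pos trivial, if_neg hc]
        rw [hstep, if_neg hc]
        have ht := ih row (p ++ [a]) (k + 1)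
        simp only [List.tail_cons] at ht
        rw [ht]
        cases hj : findJ (b :: r) with
        | none => simp [List.dropLast_cons₂]
        | some j' =>
          simp only [Option.map_some]
          have hk : k + 1 + j' = k + (j' + 1) := by omega
          simp [hk, List.take_succ_cons, List.drop_succ_cons]

theorem ptRound_eq (max_len : Nat) (pds : List (List Int)) (x_ : List String) (h : 2 < x_.length) :
    ptRound max_len (pds, x_) =
      match findJ x_ with
      | some j => (pds ++ [(List.replicate max_len (0 : Int)).set j 1],
          x_.take j ++ [if x_.getD (j + 1) "" = "]" then "b" else "["] ++ x_.drop (j + 2))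
      | none => (pds ++ [List.replicate max_len (0 : Int)], x_.dropLast) := by
  unfold ptRound
  rw [if_pos h]
  rw [PySem.List.slice_to_neg_one, PySem.List.slice_from_one]
  dsimp only
  rw [zip_dropLast_tail]
  have := scan_spec x_ (List.replicate max_len (0 : Int)) [] 0
  cases hj : findJ x_ with
  | none =>
    rw [hj] at this
    simp only [Prod.mk.injEq] at this
    simp [this.1, this.2]
  | some j =>
    rw [hj] at this
    simp only [Prod.mk.injEq] at this
    simp [this.1, this.2]

theorem altLoop_len_le (max_len : Nat) (x_ : List String) (h : ¬ 2 < x_.length) :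
    altLoop max_len x_ = [] := by
  rw [altLoop.eq_def, dif_neg h]

theorem outer_eq (max_len : Nat) : ∀ (n : Nat) (x_ : List String) (pds : List (List Int)),
    x_.length ≤ n + 2 →
    ((List.range n).foldl (fun st _ => ptRound max_len st) (pds, x_)).1 =
      pds ++ altLoop max_len x_ := by
  intro n
  induction n with
  | zero =>
    intro x_ pds h
    rw [altLoop_len_le max_len x_ (by omega)]
    simp
  | succ n ih =>
    intro x_ pds h
    rw [List.range_succ_eq_map, List.foldl_cons, List.foldl_map]
    by_cases h2 : 2 < x_.length
    · rw [ptRound_eq max_len pds x_ h2]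
      rw [altLoop.eq_def, dif_pos h2]
      cases hj : findJ x_ with
      | none =>
        simp only []
        rw [ih x_.dropLast (pds ++ [List.replicate max_len (0 : Int)]) (by simp; omega)]
        simp
      | some j =>
        have hlt := findJ_lt hj
        simp only []
        rw [ih _ (pds ++ [(List.replicate max_len (0 : Int)).set j 1])
          (by simp [List.length_take, List.length_drop]; omega)]
        simp
    · have hround : ptRound max_len (pds, x_) = (pds, x_) := by
        unfold ptRound; rw [if_neg h2]
      rw [hround, ih x_ pds (by omega)]

theorem range_map_const (n : Nat) (z : List Int) :
    (List.range n).map (fun _ => z) = List.replicate n z := by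
  simp [List.map_const']

theorem ptPad_eq (max_len : Nat) (pds : List (List Int)) :
    ptPad max_len pds =
      pds ++ List.replicate (max_len - pds.length) (List.replicate max_len (0 : Int)) := by
  fun_induction ptPad max_len pds with
  | case1 pds h ih =>
    rw [ih]
    have h1 : max_len - pds.length = (max_len - (pds.length + 1)) + 1 := by omega
    simp only [List.length_append, List.length_cons, List.length_nil]
    rw [h1, List.replicate_succ]
    simp
  | case2 pds h =>
    have : max_len - pds.length = 0 := by omega
    simp [this]

-- ---- decomposing altLoop into merge rows plus trailing zero rows ----

theorem findJ_append_none_split : ∀ (a b : List String), findJ (a ++ b) = none →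
    findJ a = none ∧ findJ b = none ∧
      (∀ x y, a.getLast? = some x → b.head? = some y →
        (PySem.Str.isIn "[" x && !(PySem.Str.isIn "[" y)) = false) := by
  intro a
  induction a with
  | nil => intro b h; exact ⟨rfl, h, by simp⟩
  | cons x a ih =>
    intro b h
    cases a with
    | nil =>
      cases b with
      | nil => exact ⟨rfl, rfl, by simp⟩
      | cons y r =>
        rw [List.cons_append, List.nil_append, findJ] at h
        split at h
        · cases h
        · rename_i hm
          simp only [Option.map_eq_none_iff] at h
          refine ⟨rfl, h, ?_⟩
          intro u v hu hv
          have hu' : x = u := by simpa using hu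
          have hv' : y = v := by simpa using hv
          subst hu'; subst hv'
          exact Bool.eq_false_iff.mpr hm
    | cons z a' =>
      rw [List.cons_append, List.cons_append, findJ] at h
      split at h
      · cases h
      · rename_i hm
        simp only [Option.map_eq_none_iff] at h
        rw [← List.cons_append] at h
        obtain ⟨h1, h2, h3⟩ := ih b h
        refine ⟨?_, h2, ?_⟩
        · rw [findJ, if_neg hm, h1]; rfl
        · intro u v hu hv
          rw [List.getLast?_cons_cons] at hu
          exact h3 u v hu hv

theorem findJ_append_irred : ∀ (a : List String), findJ a = none →
    ∀ (t : String) (Q : List String),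
    (∀ l, a.getLast? = some l → (PySem.Str.isIn "[" l && !(PySem.Str.isIn "[" t)) = false) →
    findJ (a ++ t :: Q) = (findJ (t :: Q)).map (· + a.length) := by
  intro a
  induction a with
  | nil =>
    intro _ t Q _
    simp only [List.nil_append, List.length_nil]
    cases findJ (t :: Q) <;> simp
  | cons x a ih =>
    intro hC t Q hlast
    cases a with
    | nil =>
      rw [List.cons_append, List.nil_append, findJ,
        if_neg (by rw [hlast x rfl]; simp)]
      cases findJ (t :: Q) <;> simp
    | cons y a' =>
      rw [findJ] at hC
      split at hC
      · cases hC
      · rename_i hm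
        simp only [Option.map_eq_none_iff] at hC
        rw [List.cons_append, List.cons_append, findJ, if_neg hm, ← List.cons_append,
          ih hC t Q (by
            intro l hl
            apply hlast
            rw [List.getLast?_cons_cons]
            exact hl)]
        cases findJ (t :: Q) <;> simp <;> omega

theorem findJ_dropLast_none {x_ : List String} (h : findJ x_ = none) :
    findJ x_.dropLast = none := by
  cases hx : x_ with
  | nil => rfl
  | cons a t =>
    have hne : x_ ≠ [] := by rw [hx]; simp
    have := List.dropLast_concat_getLast hne
    rw [← hx]
    have h2 : findJ (x_.dropLast ++ [x_.getLast hne]) = none := by rw [this]; exact h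
    exact (findJ_append_none_split _ _ h2).1

theorem altLoop_none (max_len : Nat) : ∀ (n : Nat) (x_ : List String), x_.length ≤ n →
    findJ x_ = none →
    altLoop max_len x_ = List.replicate (x_.length - 2) (List.replicate max_len (0 : Int)) := by
  intro n
  induction n with
  | zero =>
    intro x_ hn _
    have : x_ = [] := List.length_eq_zero_iff.mp (by omega)
    subst this
    rw [altLoop_len_le max_len [] (by simp)]
    simp
  | succ n ih =>
    intro x_ hn hf
    by_cases h2 : 2 < x_.length
    · rw [altLoop.eq_def, dif_pos h2]
      have hrw : (match hfm : findJ x_ with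
          | none => List.replicate max_len (0 : Int) :: altLoop max_len x_.dropLast
          | some j => (List.replicate max_len (0 : Int)).set j 1 ::
              altLoop max_len (x_.take j ++ [if x_.getD (j + 1) "" = "]" then "b" else "["] ++ x_.drop (j + 2)))
          = List.replicate max_len (0 : Int) :: altLoop max_len x_.dropLast := by
        split
        · rfl
        · rename_i j hj; rw [hf] at hj; cases hj
      rw [hrw, ih x_.dropLast (by simp; omega) (findJ_dropLast_none hf)]
      have h1 : x_.length - 2 = (x_.dropLast.length - 2) + 1 := by simp; omega
      rw [h1, List.replicate_succ]
    · rw [altLoop_len_le max_len x_ h2]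
      have : x_.length - 2 = 0 := by omega
      simp [this]

theorem lmRowsB_length_le (max_len : Nat) : ∀ (b : Nat) (xs : List String),
    (lmRowsB max_len b xs).length ≤ b := by
  intro b
  induction b with
  | zero => intro xs; simp [lmRowsB]
  | succ b ih =>
    intro xs
    rw [lmRowsB]
    cases findJ xs with
    | none => simp
    | some j => simpa using ih _

theorem altLoop_decomp (max_len : Nat) : ∀ (n : Nat) (x_ : List String), x_.length ≤ n →
    altLoop max_len x_ =
      lmRowsB max_len (x_.length - 2) x_ ++
        List.replicate ((x_.length - 2) - (lmRowsB max_len (x_.length - 2) x_).length)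
          (List.replicate max_len (0 : Int)) := by
  intro n
  induction n with
  | zero =>
    intro x_ hn
    have : x_ = [] := List.length_eq_zero_iff.mp (by omega)
    subst this
    rw [altLoop_len_le max_len [] (by simp)]
    simp [lmRowsB]
  | succ n ih =>
    intro x_ hn
    by_cases h2 : 2 < x_.length
    · have h1 : x_.length - 2 = (x_.length - 3) + 1 := by omega
      cases hj : findJ x_ with
      | none =>
        rw [altLoop_none max_len (n + 1) x_ hn hj, h1, lmRowsB, hj]
        simp
      | some j =>
        have hlt := findJ_lt hj
        rw [altLoop.eq_def, dif_pos h2]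
        have hrw : (match hfm : findJ x_ with
            | none => List.replicate max_len (0 : Int) :: altLoop max_len x_.dropLast
            | some j => (List.replicate max_len (0 : Int)).set j 1 ::
                altLoop max_len (x_.take j ++ [if x_.getD (j + 1) "" = "]" then "b" else "["] ++ x_.drop (j + 2)))
            = (List.replicate max_len (0 : Int)).set j 1 ::
                altLoop max_len (x_.take j ++ [if x_.getD (j + 1) "" = "]" then "b" else "["] ++ x_.drop (j + 2)) := by
          split
          · rename_i hj'; rw [hj] at hj'; cases hj'
          · rename_i j' hj'; rw [hj] at hj'; cases hj'; rfl
        rw [hrw]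
        have hmlen : (x_.take j ++ [if x_.getD (j + 1) "" = "]" then "b" else "["] ++
            x_.drop (j + 2)).length = x_.length - 1 := by
          simp [List.length_take, List.length_drop]; omega
        rw [ih _ (by rw [hmlen]; omega), h1, lmRowsB, hj, hmlen]
        have h3 : x_.length - 1 - 2 = x_.length - 3 := by omega
        rw [h3]
        simp
    · rw [altLoop_len_le max_len x_ h2]
      have h0 : x_.length - 2 = 0 := by omega
      simp [h0, lmRowsB]

theorem altLoop_length (max_len : Nat) (x_ : List String) :
    (altLoop max_len x_).length = x_.length - 2 := by
  rw [altLoop_decomp max_len x_.length x_ (le_refl _)]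
  have := lmRowsB_length_le max_len (x_.length - 2) x_
  simp; omega

-- ---- B-side: the shift-reduce pass produces exactly the leftmost-merge rows ----

theorem lmRowsB_of_none (max_len b : Nat) {xs : List String} (h : findJ xs = none) :
    lmRowsB max_len b xs = [] := by
  cases b with
  | zero => rfl
  | succ b => rw [lmRowsB, h]

theorem reduceLoop_spec (limit max_len : Nat) : ∀ (S : List String) (t : String)
    (rows : List (List Int)),
    findJ S.reverse = none → rows.length ≤ limit →
    (reduceLoop limit max_len rows S t).1.length ≤ limit ∧
    (findJ ((reduceLoop limit max_len rows S t).2.2 ::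
        (reduceLoop limit max_len rows S t).2.1).reverse = none
      ∨ (reduceLoop limit max_len rows S t).1.length = limit) ∧
    ∀ (Q : List String),
      (reduceLoop limit max_len rows S t).1 ++
        lmRowsB max_len (limit - (reduceLoop limit max_len rows S t).1.length)
          ((reduceLoop limit max_len rows S t).2.1.reverse ++
            (reduceLoop limit max_len rows S t).2.2 :: Q)
      = rows ++ lmRowsB max_len (limit - rows.length) (S.reverse ++ t :: Q) := by
  intro S
  induction S with
  | nil =>
    intro t rows hC hle
    exact ⟨hle, Or.inl rfl, fun Q => rfl⟩
  | cons s rest ih =>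
    intro t rows hC hle
    rw [reduceLoop]
    have hCsplit := findJ_append_none_split rest.reverse [s] (by simpa using hC)
    by_cases hg : rows.length < limit ∧ (PySem.Str.isIn "[" s && !(PySem.Str.isIn "[" t)) = true
    · rw [if_pos hg]
      obtain ⟨ih1, ih2, ih3⟩ := ih (if t = "]" then "b" else "[")
        (rows ++ [(List.replicate max_len (0 : Int)).set rest.length 1]) hCsplit.1
        (by simp; omega)
      refine ⟨ih1, ih2, ?_⟩
      intro Q
      rw [ih3 Q]
      have hfr : findJ ((s :: rest).reverse ++ t :: Q) = some rest.length := by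
        have he : (s :: rest).reverse ++ t :: Q = rest.reverse ++ s :: t :: Q := by
          simp
        rw [he, findJ_append_irred rest.reverse hCsplit.1 s (t :: Q)
          (by intro l hl; exact hCsplit.2.2 l s hl rfl)]
        rw [findJ, if_pos hg.2]
        simp
      have hb : limit - rows.length = (limit - (rows.length + 1)) + 1 := by omega
      rw [hb, lmRowsB, hfr]
      dsimp only
      have hgetD : ((s :: rest).reverse ++ t :: Q).getD (rest.length + 1) "" = t := by
        have h1 : ((s :: rest).reverse).length = rest.length + 1 := by simp
        rw [List.getD_eq_getElem?_getD, List.getElem?_append_right (by simp)]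
        simp
      have htake : ((s :: rest).reverse ++ t :: Q).take rest.length = rest.reverse := by
        rw [List.reverse_cons, List.append_assoc,
          List.take_append_of_le_length (by simp)]
        simp
      have hdrop : ((s :: rest).reverse ++ t :: Q).drop (rest.length + 2) = Q := by
        have he : (s :: rest).reverse ++ t :: Q = (rest.reverse ++ [s]) ++ t :: Q := by simp
        have hl : rest.length + 2 = (rest.reverse ++ [s]).length + 1 := by simp
        rw [he, hl, List.drop_length_add_append]
        rfl
      rw [hgetD, htake, hdrop]
      simp
    · rw [if_neg hg]
      refine ⟨hle, ?_, by simp⟩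
      by_cases hb : rows.length < limit
      · left
        have hmf : (PySem.Str.isIn "[" s && !(PySem.Str.isIn "[" t)) = false := by
          rcases Bool.eq_false_or_eq_true (PySem.Str.isIn "[" s && !(PySem.Str.isIn "[" t))
            with h | h
          · exact absurd ⟨hb, h⟩ hg
          · exact h
        have : (t :: s :: rest).reverse = (s :: rest).reverse ++ [t] := by simp
        rw [this, findJ_append_irred (s :: rest).reverse hC t []
          (by
            intro l hl
            have hls : s = l := by
              rw [List.getLast?_reverse] at hl
              simpa using hl
            rw [← hls]; exact hmf)]
        rfl
      · exact Or.inr (le_antisymm hle (Nat.le_of_not_lt hb))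

theorem reduceLoop_frozen (limit max_len : Nat) (rows : List (List Int)) (S : List String)
    (t : String) (h : rows.length = limit) :
    reduceLoop limit max_len rows S t = (rows, S, t) := by
  cases S with
  | nil => rfl
  | cons s rest =>
    rw [reduceLoop, if_neg]
    rintro ⟨h1, _⟩
    omega

theorem fold_spec (limit max_len : Nat) : ∀ (Q : List String) (S : List String)
    (rows : List (List Int)),
    rows.length ≤ limit → (findJ S.reverse = none ∨ rows.length = limit) →
    (Q.foldl (fun (st : List (List Int) × List String) tok =>
        let r := reduceLoop limit max_len st.1 st.2 tok
        (r.1, r.2.2 :: r.2.1)) (rows, S)).1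
    = rows ++ lmRowsB max_len (limit - rows.length) (S.reverse ++ Q) := by
  intro Q
  induction Q with
  | nil =>
    intro S rows hle hC
    rcases hC with hC | hfull
    · simp [lmRowsB_of_none max_len _ hC]
    · simp [hfull, lmRowsB]
  | cons t Q ih =>
    intro S rows hle hC
    rcases hC with hC | hfull
    · obtain ⟨h1, h2, h3⟩ := reduceLoop_spec limit max_len S t rows hC hle
      simp only [List.foldl_cons]
      rw [ih _ _ h1 h2]
      have he : ((reduceLoop limit max_len rows S t).2.2 ::
          (reduceLoop limit max_len rows S t).2.1).reverse ++ Q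
          = (reduceLoop limit max_len rows S t).2.1.reverse ++
            (reduceLoop limit max_len rows S t).2.2 :: Q := by
        simp
      rw [he]
      exact h3 Q
    · simp only [List.foldl_cons, reduceLoop_frozen limit max_len rows S t hfull]
      rw [ih _ _ hle (Or.inr hfull)]
      simp [hfull, lmRowsB]

-- ---- assembling both sides ----

theorem parse_trees_eq (batch_x : List (List String)) :
    parse_trees batch_x = parse_trees_alt batch_x := by
  unfold parse_trees parse_trees_alt
  simp only []
  rw [PySem.List.foldl_append_singleton_eq_map]
  simp only [List.nil_append]
  apply List.map_congr_left
  intro x hx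
  set max_len : Nat := (PySem.List.max? (batch_x.map (fun x => x.length)) (fun v => v)).getD 0 with hml
  have hxle : x.length ≤ max_len := by
    have hmem : x.length ∈ batch_x.map (fun x => x.length) := List.mem_map_of_mem hx
    cases hmax : PySem.List.max? (batch_x.map (fun x => x.length)) (fun v => v) with
    | none =>
      rw [PySem.List.max?_eq_none_iff] at hmax
      rw [hmax] at hmem
      cases hmem
    | some m =>
      have := PySem.List.max?_isMax hmax x.length hmem
      simp [hml, hmax]
      exact this
  -- A side
  rw [outer_eq _ x.length x [] (by omega), List.nil_append, ptPad_eq, altLoop_length,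
    altLoop_decomp max_len x.length x (le_refl _)]
  -- B side
  rw [fold_spec (x.length - 2) max_len x [] [] (by simp) (Or.inl rfl)]
  rw [range_map_const]
  simp only [List.reverse_nil, List.nil_append, Nat.sub_zero, List.length_nil]
  rw [List.append_assoc, ← List.replicate_add]
  have hlm := lmRowsB_length_le max_len (x.length - 2) x
  congr 1
  congr 1
  omega

-- ===== VERDICT (by name: the statement is the Claim_ definition above) =====
theorem parse_trees_spec : Claim_equal_parse_trees := by
  intro batch_x _ _
  unfold Spec_parse_trees
  exact parse_trees_eq batch_x
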